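-- pv_equiv track=rewrite | github.com/elenaborisova/LeetCode-Solutions | array/count_subarrays.py | count_subarrays
-- ===== SOURCE A (Python) =====
-- def count_subarrays(arr):
--     subarrays_count = []
--
--     for i in range(len(arr)):
--         current_subarray = [arr[i]]
--
--         j = i - 1
--         while j >= 0 and arr[j] < arr[i]:
--             current_subarray.append(arr[j:i + 1])
--             j -= 1
--
--         j = i + 1
--         while j < len(arr) and arr[j] < arr[i]:
--             current_subarray.append(arr[i:j + 1])
--             j += 1
--
--         subarrays_count.append(len(current_subarray))
--
--     return subarrays_count
-- ===== SOURCE B (Python) =====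
-- def count_subarrays(arr):
--     # Stock-span style jump DP: one left pass; the right pass is the left
--     # pass on the reversed list.  Each jump skips a whole known span.
--     def spans(a):
--         left = []
--         for i in range(len(a)):
--             j = i - 1
--             while j >= 0 and a[j] < a[i]:
--                 j -= left[j] + 1
--             left.append(i - j - 1)
--         return left
--
--     L = spans(arr)
--     R = spans(arr[::-1])[::-1]
--     return [1 + L[i] + R[i] for i in range(len(arr))]
-- ===== Notes on version B (the rewrite author's own statement) =====
-- stated objective: faster
-- what changed: Replaces the per-element linear neighbor scans (which also build slice lists just to take their length) with a stock-span jump DP: each pass reuses previously computed span lengths to skip whole spans, and the right pass is the left pass on the reversed list.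
import Mathlib
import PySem

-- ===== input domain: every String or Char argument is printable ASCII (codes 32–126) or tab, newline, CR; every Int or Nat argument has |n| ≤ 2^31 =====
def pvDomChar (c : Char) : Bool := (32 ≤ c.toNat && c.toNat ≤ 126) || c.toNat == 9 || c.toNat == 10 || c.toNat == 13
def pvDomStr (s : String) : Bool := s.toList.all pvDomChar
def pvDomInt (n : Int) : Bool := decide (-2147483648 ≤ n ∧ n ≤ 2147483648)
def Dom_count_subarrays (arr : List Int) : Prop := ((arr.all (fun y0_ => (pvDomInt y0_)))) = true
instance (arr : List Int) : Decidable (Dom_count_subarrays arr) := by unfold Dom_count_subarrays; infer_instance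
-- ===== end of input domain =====

-- B replaces A's per-element linear neighbor scans by a stock-span jump DP (right pass = left pass on the reversed list); objective: faster.

-- ===== PORT A =====
-- Python's current_subarray is heterogeneous (an int, then list slices); only its
-- length is used, so it is represented as List (List Int) with the int boxed.
-- left while-loop: jj encodes j+1 (jj = 0 means j = -1, loop exit).
def aLeftLoop (arr : List Int) (i : Nat) (x : Int) : Nat → List (List Int) → List (List Int)
  | 0, acc => acc
  | jj+1, acc =>
    if arr.getD jj 0 < x then
      aLeftLoop arr i x jj (acc ++ [PySem.List.slice arr (some (jj:Int)) (some ((i:Int)+1))])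
    else acc

def aRightLoop (arr : List Int) (i : Nat) (x : Int) (j : Nat) (acc : List (List Int)) : List (List Int) :=
  if j < arr.length then
    if arr.getD j 0 < x then
      aRightLoop arr i x (j+1) (acc ++ [PySem.List.slice arr (some (i:Int)) (some ((j:Int)+1))])
    else acc
  else acc
termination_by arr.length - j

def count_subarrays (arr : List Int) : List Int :=
  (List.range arr.length).map (fun i =>
    let x := arr.getD i 0
    let cur : List (List Int) := [[x]]
    let cur := aLeftLoop arr i x i cur          -- j starts at i-1, i.e. jj = i
    let cur := aRightLoop arr i x (i+1) cur
    (cur.length : Int))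

-- ===== PORT B =====
-- inner while of spans: jj encodes j+1; step j -= left[j]+1 is jj := jj - left[jj]
def jumpLoop (arr : List Int) (x : Int) (left : List Nat) : Nat → Nat
  | 0 => 0
  | jj+1 => if arr.getD jj 0 < x then jumpLoop arr x left (jj - left.getD jj 0) else jj+1
termination_by jj => jj
decreasing_by omega

def spans (a : List Int) : List Nat :=
  (List.range a.length).foldl
    (fun left i => left ++ [i - jumpLoop a (a.getD i 0) left i]) []

def count_subarrays_alt (arr : List Int) : List Int :=
  let L := spans arr
  let R := (spans arr.reverse).reverse
  (List.range arr.length).map (fun i => ((1 + L.getD i 0 + R.getD i 0 : Nat) : Int))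

-- ===== PRECONDITION & SPEC =====
def Spec_count_subarrays (arr : List Int) (out : List Int) : Prop := out = count_subarrays_alt arr
instance (arr : List Int) (out : List Int) : Decidable (Spec_count_subarrays arr out) := by unfold Spec_count_subarrays; infer_instance

-- ===== CLAIM (what is proved, stated in full; the proofs are below) =====
def Claim_equal_count_subarrays : Prop := ∀ (arr : List Int), Dom_count_subarrays arr → Spec_count_subarrays arr (count_subarrays arr)

-- ===== LEMMAS AND PROOFS =====

-- number of consecutive strictly smaller elements below position jj (scanning down)
def down (a : List Int) (x : Int) : Nat → Nat
  | 0 => 0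
  | jj+1 => if a.getD jj 0 < x then down a x jj + 1 else 0

-- number of consecutive strictly smaller elements from position j upward
def up (a : List Int) (x : Int) (j : Nat) : Nat :=
  if j < a.length then (if a.getD j 0 < x then up a x (j+1) + 1 else 0) else 0
termination_by a.length - j

-- stop position (encoded +1) of the naive downward scan
def gstop (a : List Int) (x : Int) : Nat → Nat
  | 0 => 0
  | jj+1 => if a.getD jj 0 < x then gstop a x jj else jj+1

theorem len_aLeftLoop (arr : List Int) (i : Nat) (x : Int) :
    ∀ (jj : Nat) (acc : List (List Int)),
      (aLeftLoop arr i x jj acc).length = acc.length + down arr x jj := by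
  intro jj
  induction jj with
  | zero => intro acc; simp [aLeftLoop, down]
  | succ jj ih =>
    intro acc
    simp only [aLeftLoop, down]
    split_ifs with h
    · rw [ih]; simp; omega
    · simp

theorem len_aRightLoop (arr : List Int) (i : Nat) (x : Int) :
    ∀ (j : Nat) (acc : List (List Int)),
      (aRightLoop arr i x j acc).length = acc.length + up arr x j := by
  intro j acc
  fun_induction aRightLoop arr i x j acc with
  | case1 j acc hlen hlt ih =>
    rw [up, if_pos hlen, if_pos hlt, ih]; simp; omega
  | case2 j acc hlen hlt =>
    rw [up, if_pos hlen, if_neg hlt]; simp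
  | case3 j acc hlen =>
    rw [up, if_neg hlen]; simp

theorem gstop_le (a : List Int) (x : Int) : ∀ jj, gstop a x jj ≤ jj := by
  intro jj
  induction jj with
  | zero => simp [gstop]
  | succ jj ih => simp only [gstop]; split_ifs with h <;> omega

theorem down_eq (a : List Int) (x : Int) : ∀ jj, down a x jj = jj - gstop a x jj := by
  intro jj
  induction jj with
  | zero => simp [down, gstop]
  | succ jj ih =>
    have hle := gstop_le a x jj
    simp only [down, gstop]
    split_ifs with h <;> omega

theorem gstop_lt_elems (a : List Int) (x : Int) :
    ∀ jj k, gstop a x jj ≤ k → k < jj → a.getD k 0 < x := by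
  intro jj
  induction jj with
  | zero => intro k h1 h2; omega
  | succ jj ih =>
    intro k h1 h2
    by_cases h : a.getD jj 0 < x
    · rcases Nat.lt_succ_iff_lt_or_eq.mp h2 with hk | hk
      · rw [gstop, if_pos h] at h1
        exact ih k h1 hk
      · subst hk; exact h
    · simp only [gstop, if_neg h] at h1; omega

theorem gstop_skip (a : List Int) (x : Int) :
    ∀ jj m, m ≤ jj → (∀ k, m ≤ k → k < jj → a.getD k 0 < x) → gstop a x jj = gstop a x m := by
  intro jj
  induction jj with
  | zero => intro m h1 _; interval_cases m; rfl
  | succ jj ih =>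
    intro m h1 h2
    rcases Nat.lt_succ_iff_lt_or_eq.mp (Nat.lt_succ_of_le h1) with hm | hm
    · have hj : a.getD jj 0 < x := h2 jj (by omega) (by omega)
      rw [gstop, if_pos hj]
      exact ih m (by omega) (fun k hk1 hk2 => h2 k hk1 (by omega))
    · subst hm; rfl

theorem jump_eq (a : List Int) (x : Int) (left : List Nat) (i : Nat)
    (hL : ∀ k, k < i → left.getD k 0 = down a (a.getD k 0) k) :
    ∀ jj, jj ≤ i → jumpLoop a x left jj = gstop a x jj := by
  intro jj
  induction jj using Nat.strong_induction_on with
  | _ jj ih =>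
    match jj with
    | 0 => intro _; simp [jumpLoop, gstop]
    | jj+1 =>
      intro hji
      by_cases h : a.getD jj 0 < x
      · have hlj : left.getD jj 0 = down a (a.getD jj 0) jj := hL jj (by omega)
        have hg := gstop_le a (a.getD jj 0) jj
        have hd := down_eq a (a.getD jj 0) jj
        have hm : jj - left.getD jj 0 = gstop a (a.getD jj 0) jj := by omega
        have hskip : gstop a x jj = gstop a x (gstop a (a.getD jj 0) jj) :=
          gstop_skip a x jj _ hg
            (fun k hk1 hk2 => lt_trans (gstop_lt_elems a (a.getD jj 0) jj k hk1 hk2) h)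
        rw [jumpLoop, if_pos h, hm, ih _ (by omega) (by omega), gstop, if_pos h, hskip]
      · rw [jumpLoop, if_neg h, gstop, if_neg h]

theorem spans_aux (a : List Int) :
    ∀ m, (List.range m).foldl
        (fun left i => left ++ [i - jumpLoop a (a.getD i 0) left i]) []
      = (List.range m).map (fun i => down a (a.getD i 0) i) := by
  intro m
  induction m with
  | zero => simp
  | succ m ih =>
    rw [List.range_succ, List.foldl_append, List.map_append, ih]
    simp only [List.foldl_cons, List.foldl_nil, List.map_cons, List.map_nil]
    have hL : ∀ k, k < m →
        ((List.range m).map (fun i => down a (a.getD i 0) i)).getD k 0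
          = down a (a.getD k 0) k := by
      intro k hk
      exact PySem.List.getD_map_range _ m k 0 hk
    rw [jump_eq a (a.getD m 0) _ m hL m (le_refl m)]
    have hg := gstop_le a (a.getD m 0) m
    have hd := down_eq a (a.getD m 0) m
    have hval : m - gstop a (a.getD m 0) m = down a (a.getD m 0) m := by omega
    rw [hval]

theorem spans_eq (a : List Int) :
    spans a = (List.range a.length).map (fun i => down a (a.getD i 0) i) :=
  spans_aux a a.length

theorem up_eq_down_reverse (a : List Int) (x : Int) :
    ∀ j, up a x j = down a.reverse x (a.length - j) := by
  intro j
  fun_induction up a x j with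
  | case1 j hlen hlt ih =>
    have hidx : a.length - j = (a.length - (j+1)) + 1 := by omega
    have hrev : a.reverse.getD (a.length - (j+1)) 0 = a.getD j 0 := by
      rw [List.getD_eq_getElem _ _ (by simp; omega), List.getElem_reverse,
          List.getD_eq_getElem _ _ (by omega)]
      congr 1
      omega
    rw [hidx, down, hrev, if_pos hlt, ih]
  | case2 j hlen hlt =>
    have hidx : a.length - j = (a.length - (j+1)) + 1 := by omega
    have hrev : a.reverse.getD (a.length - (j+1)) 0 = a.getD j 0 := by
      rw [List.getD_eq_getElem _ _ (by simp; omega), List.getElem_reverse,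
          List.getD_eq_getElem _ _ (by omega)]
      congr 1
      omega
    rw [hidx, down, hrev, if_neg hlt]
  | case3 j hlen =>
    have : a.length - j = 0 := by omega
    rw [this, down]

theorem getD_reverse {A : Type} (l : List A) (d : A) (i : Nat) (h : i < l.length) :
    l.reverse.getD i d = l.getD (l.length - 1 - i) d := by
  rw [List.getD_eq_getElem _ _ (by simpa using h), List.getElem_reverse,
      List.getD_eq_getElem _ _ (by omega)]

-- ===== VERDICT (by name: the statement is the Claim_ definition above) =====
theorem count_subarrays_spec : Claim_equal_count_subarrays := by
  intro arr _
  unfold Spec_count_subarrays count_subarrays count_subarrays_alt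
  simp only []
  apply List.map_congr_left
  intro i hi
  have hin : i < arr.length := List.mem_range.mp hi
  rw [len_aRightLoop, len_aLeftLoop]
  rw [spans_eq arr, spans_eq arr.reverse, List.length_reverse]
  rw [PySem.List.getD_map_range _ _ i 0 hin]
  rw [getD_reverse _ 0 i (by simpa using hin)]
  rw [List.length_map, List.length_range]
  rw [PySem.List.getD_map_range _ _ _ 0 (by omega)]
  have hrev2 : arr.reverse.getD (arr.length - 1 - i) 0 = arr.getD i 0 := by
    rw [getD_reverse arr 0 _ (by omega)]
    congr 1
    omega
  rw [hrev2]
  have hup := up_eq_down_reverse arr (arr.getD i 0) (i+1)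
  have hidx2 : arr.length - (i+1) = arr.length - 1 - i := by omega
  rw [hidx2] at hup
  rw [← hup]
  simp
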